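-- pv_equiv track=rewrite | github.com/jramaswami/Binary_Search_Python | count_of_sublists_with_same_first_and_last_values.py | solve
-- ===== SOURCE A (Python) =====
-- import collections
--
-- def solve(nums):
--     # n Choose 2 = (n * (n-1)) / 2
--     def nC2(n):
--         return (n * (n - 1)) // 2
--
--     freqs = collections.Counter(nums)
--     soln = 0
--     for k, f in freqs.items():
--         soln += f
--         soln += nC2(f)
--     return soln
-- ===== SOURCE B (Python) =====
-- def solve(nums):
--     seen = {}
--     total = 0
--     for val in nums:
--         c = seen.get(val, 0)
--         total += c + 1
--         seen[val] = c + 1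
--     return total
-- ===== Notes on version B (the rewrite author's own statement) =====
-- stated objective: simpler
-- what changed: B drops the Counter pre-pass and the nC2 closed form: a single pass keeps a running dictionary of counts seen so far and adds seen[val]+1 per element, accumulating each value's triangular count incrementally.
import Mathlib
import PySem

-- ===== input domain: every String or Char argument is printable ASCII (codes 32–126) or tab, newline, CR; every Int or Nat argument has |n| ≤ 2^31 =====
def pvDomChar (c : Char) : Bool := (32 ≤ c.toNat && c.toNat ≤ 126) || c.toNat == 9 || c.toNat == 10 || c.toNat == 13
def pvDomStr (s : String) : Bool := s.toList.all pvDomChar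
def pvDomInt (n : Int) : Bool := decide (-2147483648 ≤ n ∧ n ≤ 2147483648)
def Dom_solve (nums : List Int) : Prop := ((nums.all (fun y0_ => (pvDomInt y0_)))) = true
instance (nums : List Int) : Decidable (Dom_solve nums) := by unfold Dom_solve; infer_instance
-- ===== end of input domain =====

-- B replaces A's Counter pre-pass + per-key nC2 closed form with a single pass keeping a
-- running dict of counts seen so far, adding seen[val]+1 per element (objective: simpler).

-- ===== PORT A =====
-- helper nC2 from A
def nC2 (n : Int) : Int := PySem.Int.floordiv (n * (n - 1)) 2

def solve (nums : List Int) : Int :=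
  let freqs : PySem.Dict Int Int := PySem.Dict.counter nums
  freqs.items.foldl (fun soln p => soln + p.2 + nC2 p.2) 0

-- ===== PORT B =====
def solve_alt (nums : List Int) : Int :=
  (nums.foldl
    (fun (st : PySem.Dict Int Int × Int) val =>
      let c := st.1.getD val 0
      (st.1.insert val (c + 1), st.2 + (c + 1)))
    (PySem.Dict.empty, 0)).2

-- ===== PRECONDITION & SPEC =====
def Spec_solve (nums : List Int) (out : Int) : Prop := out = solve_alt nums
instance (nums : List Int) (out : Int) : Decidable (Spec_solve nums out) := by unfold Spec_solve; infer_instance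

-- ===== CLAIM (what is proved, stated in full; the proofs are below) =====
def Claim_equal_solve : Prop := ∀ (nums : List Int), Dom_solve nums → Spec_solve nums (solve nums)

-- ===== LEMMAS AND PROOFS =====

-- triangular value of a count: f + nC2 f
def pvT (f : Int) : Int := f + nC2 f

-- the common mathematical value: sum of pvT over per-value counts
def pvS (l : List Int) : Int :=
  ((PySem.Set.ofList l).map (fun k => pvT ((l.count k : Int)))).sum

theorem pvT_succ (c : Int) : pvT (c + 1) = pvT c + (c + 1) := by
  unfold pvT nC2
  have h : (c + 1) * (c + 1 - 1) = c * (c - 1) + c * 2 := by ring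
  have h2 : PySem.Int.floordiv (c * (c - 1) + c * 2) 2 = PySem.Int.floordiv (c * (c - 1)) 2 + c := by
    show Int.fdiv _ _ = _
    rw [Int.add_mul_fdiv_right _ c (by norm_num : (2:Int) ≠ 0)]
    rfl
  rw [h, h2]
  ring

-- A's fold over items accumulates the sum of pvT of the second components
theorem solve_foldl (ps : List (Int × Int)) (a : Int) :
    ps.foldl (fun soln p => soln + p.2 + nC2 p.2) a = a + (ps.map (fun p => pvT p.2)).sum := by
  induction ps generalizing a with
  | nil => simp
  | cons p ps ih => simp [List.foldl_cons, ih, pvT]; ring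

theorem solve_eq_pvS (nums : List Int) : solve nums = pvS nums := by
  unfold pvS
  show (PySem.Dict.counter nums).items.foldl (fun soln p => soln + p.2 + nC2 p.2) 0 = _
  rw [PySem.Dict.items_counter, solve_foldl, List.map_map]
  simp [Function.comp_def]

-- counts are unchanged at keys ≠ v when appending [v]
theorem count_append_ne (l : List Int) (v k : Int) (h : k ≠ v) :
    (l ++ [v]).count k = l.count k := by
  simp [List.count_append, List.count_singleton]
  omega

theorem count_append_self (l : List Int) (v : Int) :
    ((l ++ [v]).count v : Int) = (l.count v : Int) + 1 := by
  simp [List.count_append]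

-- summing pvT of the new counts over a nodup key list containing v
theorem sum_update (l : List Int) (v : Int) (s : List Int) (hnd : s.Nodup) (hv : v ∈ s) :
    (s.map (fun k => pvT (((l ++ [v]).count k : Int)))).sum
      = (s.map (fun k => pvT ((l.count k : Int)))).sum + ((l.count v : Int) + 1) := by
  induction s with
  | nil => cases hv
  | cons k s ih =>
    rcases List.nodup_cons.mp hnd with ⟨hk, hnds⟩
    by_cases hkv : k = v
    · subst hkv
      have htail : ∀ x ∈ s, pvT (((l ++ [k]).count x : Int)) = pvT ((l.count x : Int)) := by
        intro x hx
        rw [count_append_ne l k x (fun h => hk (h ▸ hx))]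
      simp only [List.map_cons, List.sum_cons]
      rw [List.map_congr_left htail, count_append_self, pvT_succ]
      ring
    · have hv' : v ∈ s := by cases hv with
        | head => exact absurd rfl hkv
        | tail _ h => exact h
      simp only [List.map_cons, List.sum_cons]
      rw [ih hnds hv', count_append_ne l v k hkv]
      ring

theorem pvS_append (l : List Int) (v : Int) :
    pvS (l ++ [v]) = pvS l + ((l.count v : Int) + 1) := by
  unfold pvS
  have hof : PySem.Set.ofList (l ++ [v]) = PySem.Set.add (PySem.Set.ofList l) v := by
    rw [PySem.Set.ofList_eq_foldl, PySem.Set.ofList_eq_foldl, List.foldl_append]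
    rfl
  by_cases hv : v ∈ l
  · have hmem : v ∈ PySem.Set.ofList l := (PySem.Set.mem_ofList l v).mpr hv
    have hadd : PySem.Set.add (PySem.Set.ofList l) v = PySem.Set.ofList l := by
      simp [PySem.Set.add, PySem.Set.contains, hmem]
    rw [hof, hadd, sum_update l v _ (PySem.Set.nodup_ofList l) hmem]
  · have hmem : v ∉ PySem.Set.ofList l := fun h => hv ((PySem.Set.mem_ofList l v).mp h)
    have hadd : PySem.Set.add (PySem.Set.ofList l) v = PySem.Set.ofList l ++ [v] := by
      simp [PySem.Set.add, PySem.Set.contains, hmem]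
    rw [hof, hadd, List.map_append, List.sum_append]
    have htail : ∀ x ∈ PySem.Set.ofList l, pvT (((l ++ [v]).count x : Int)) = pvT ((l.count x : Int)) := by
      intro x hx
      rw [count_append_ne l v x (fun h => hv (h ▸ (PySem.Set.mem_ofList l x).mp hx))]
    rw [List.map_congr_left htail]
    have hcv : l.count v = 0 := List.count_eq_zero.mpr hv
    simp [List.count_append, hcv, pvT, nC2, PySem.Int.floordiv]

-- B's step function, named for the lemmas
def pvStep (st : PySem.Dict Int Int × Int) (val : Int) : PySem.Dict Int Int × Int :=
  let c := st.1.getD val 0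
  (st.1.insert val (c + 1), st.2 + (c + 1))

theorem pvStep_fst (l : List Int) (d : PySem.Dict Int Int) (t : Int) :
    (l.foldl pvStep (d, t)).1 = l.foldl (fun d x => d.insert x (d.getD x 0 + 1)) d := by
  induction l generalizing d t with
  | nil => rfl
  | cons x l ih => simp only [List.foldl_cons]; exact ih _ _

theorem solve_alt_foldl (l : List Int) : (l.foldl pvStep (PySem.Dict.empty, 0)).2 = pvS l := by
  induction l using List.reverseRecOn with
  | nil => rfl
  | append_singleton l v ih =>
    rw [List.foldl_append]
    have hfst := pvStep_fst l PySem.Dict.empty 0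
    rw [PySem.Dict.foldl_insert_getD_add_one_eq_counter] at hfst
    simp only [List.foldl_cons, List.foldl_nil, pvStep]
    rw [hfst, PySem.Dict.getD_counter, ih, pvS_append]

theorem solve_alt_eq_pvS (nums : List Int) : solve_alt nums = pvS nums := by
  unfold solve_alt
  rw [← solve_alt_foldl nums]
  rfl

-- ===== VERDICT (by name: the statement is the Claim_ definition above) =====
theorem solve_spec : Claim_equal_solve := by
  intro nums _
  unfold Spec_solve
  rw [solve_eq_pvS, solve_alt_eq_pvS]
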